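-- pv_equiv track=rewrite | github.com/Josue013/IPC2_Proyecto1_202202481 | Archivo.py | buscar_tiempo_en_tiempos
-- ===== SOURCE A (Python) =====
-- def buscar_tiempo_en_tiempos(tiempo_buscado, tiempos):
--     inicio = 0
--     fin = 0
--     while fin <= len(tiempos):
--         if fin == len(tiempos) or tiempos[fin] == ',':
--             tiempo_actual = tiempos[inicio:fin]
--             if tiempo_actual == tiempo_buscado:
--                 return True
--             inicio = fin + 1
--         fin += 1
--     return False
-- ===== SOURCE B (Python) =====
-- def buscar_tiempo_en_tiempos(tiempo_buscado, tiempos):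
--     return tiempo_buscado in tiempos.split(',')
-- ===== Notes on version B (the rewrite author's own statement) =====
-- stated objective: simpler
-- what changed: Replaces the manual char-level scan with index bookkeeping (inicio/fin) by splitting the whole string on ',' once and testing list membership.
import Mathlib
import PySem

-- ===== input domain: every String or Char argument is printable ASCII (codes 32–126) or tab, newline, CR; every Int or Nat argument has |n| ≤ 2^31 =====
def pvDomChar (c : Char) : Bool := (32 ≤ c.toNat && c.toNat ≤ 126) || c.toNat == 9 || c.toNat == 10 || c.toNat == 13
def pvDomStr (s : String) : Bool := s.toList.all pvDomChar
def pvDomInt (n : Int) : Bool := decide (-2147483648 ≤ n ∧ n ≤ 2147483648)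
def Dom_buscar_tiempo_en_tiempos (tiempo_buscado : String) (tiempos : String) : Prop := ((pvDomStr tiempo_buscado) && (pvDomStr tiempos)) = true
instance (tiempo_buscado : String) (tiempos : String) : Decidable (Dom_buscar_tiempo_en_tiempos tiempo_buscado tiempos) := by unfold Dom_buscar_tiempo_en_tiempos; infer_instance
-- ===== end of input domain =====

-- B replaces A's manual index-tracking char scan by split-on-comma then list membership (simpler decomposition).


-- ===== PORT A =====
-- the while loop: state (inicio, fin); terminates because cs.length + 1 - fin decreases
def pvLoopA (tb cs : List Char) (inicio fin : Nat) : Bool :=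
  if _h : fin ≤ cs.length then
    if fin = cs.length ∨ PySem.List.pyGet? cs (fin : Int) = some ',' then
      let tiempo_actual := PySem.List.slice cs (some (inicio : Int)) (some (fin : Int))
      if tiempo_actual = tb then true
      else pvLoopA tb cs (fin + 1) (fin + 1)
    else pvLoopA tb cs inicio (fin + 1)
  else false
termination_by cs.length + 1 - fin

def buscar_tiempo_en_tiempos (tiempo_buscado : String) (tiempos : String) : Bool :=
  pvLoopA tiempo_buscado.toList tiempos.toList 0 0

-- ===== PORT B =====
-- Source B: return tiempo_buscado in tiempos.split(',')
def buscar_tiempo_en_tiempos_alt (tiempo_buscado : String) (tiempos : String) : Bool :=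
  (((PySem.Chars.splitOn tiempos.toList ",".toList).map String.ofList).contains tiempo_buscado)

-- ===== PRECONDITION & SPEC =====
def Spec_buscar_tiempo_en_tiempos (tiempo_buscado : String) (tiempos : String) (out : Bool) : Prop := out = buscar_tiempo_en_tiempos_alt tiempo_buscado tiempos
instance (tiempo_buscado : String) (tiempos : String) (out : Bool) : Decidable (Spec_buscar_tiempo_en_tiempos tiempo_buscado tiempos out) := by unfold Spec_buscar_tiempo_en_tiempos; infer_instance

-- ===== CLAIM (what is proved, stated in full; the proofs are below) =====
def Claim_equal_buscar_tiempo_en_tiempos : Prop := ∀ (tiempo_buscado : String) (tiempos : String), Dom_buscar_tiempo_en_tiempos tiempo_buscado tiempos → Spec_buscar_tiempo_en_tiempos tiempo_buscado tiempos (buscar_tiempo_en_tiempos tiempo_buscado tiempos)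

-- ===== LEMMAS AND PROOFS =====

-- reference splitter on single-char ',' separator
def pvSplitComma : List Char → List (List Char)
  | [] => [[]]
  | c :: rest =>
      if c = ',' then [] :: pvSplitComma rest
      else
        match pvSplitComma rest with
        | [] => [[c]]   -- unreachable
        | h :: t => (c :: h) :: t

def pvMapHead (p : List Char) : List (List Char) → List (List Char)
  | [] => []
  | h :: t => (p ++ h) :: t

theorem pvSplitComma_ne_nil (l : List Char) : pvSplitComma l ≠ [] := by
  cases l with
  | nil => simp [pvSplitComma]
  | cons c rest =>
    simp only [pvSplitComma]
    split
    · simp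
    · split <;> simp

theorem pvGo_eq (fuel : Nat) : ∀ (l cur : List Char) (acc : List (List Char)),
    l.length ≤ fuel →
    PySem.Chars.splitOn.go [','] fuel l cur acc
      = acc.reverse ++ pvMapHead cur.reverse (pvSplitComma l) := by
  induction fuel with
  | zero =>
    intro l cur acc h
    interval_cases hl : l.length
    have : l = [] := List.length_eq_zero_iff.mp hl
    subst this
    simp [PySem.Chars.splitOn.go, pvSplitComma, pvMapHead]
  | succ n ih =>
    intro l cur acc h
    cases l with
    | nil => simp [PySem.Chars.splitOn.go, pvSplitComma, pvMapHead]
    | cons c rest =>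
      by_cases hc : c = ','
      · subst hc
        have hpre : List.isPrefixOf [','] (',' :: rest) = true := by
          simp [List.isPrefixOf]
        rw [PySem.Chars.splitOn.go]
        simp only [hpre, if_pos]
        rw [ih _ _ _ (by simpa using Nat.le_of_succ_le_succ h)]
        simp only [pvSplitComma, pvMapHead]
        cases hsc : pvSplitComma rest with
        | nil => exact absurd hsc (pvSplitComma_ne_nil rest)
        | cons hh tt => simp [hsc]
      · have hc' : ¬ (',' = c) := fun e => hc e.symm
        have hpre : List.isPrefixOf [','] (c :: rest) = false := by
          simp [List.isPrefixOf, hc']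
        rw [PySem.Chars.splitOn.go]
        simp only [hpre]
        rw [if_neg (by simp)]
        rw [ih _ _ _ (by simpa using Nat.le_of_succ_le_succ h)]
        simp only [pvSplitComma, if_neg hc]
        cases hsc : pvSplitComma rest with
        | nil => exact absurd hsc (pvSplitComma_ne_nil rest)
        | cons hh tt => simp [pvMapHead]

theorem pvSplitOn_eq_splitComma (s : List Char) :
    PySem.Chars.splitOn s [','] = pvSplitComma s := by
  have := pvGo_eq (s.length + 1) s [] [] (by omega)
  simpa [PySem.Chars.splitOn, pvMapHead] using
    (by
      rw [PySem.Chars.splitOn]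
      rw [this]
      cases hsc : pvSplitComma s with
      | nil => exact absurd hsc (pvSplitComma_ne_nil s)
      | cons hh tt => simp [pvMapHead] :
        PySem.Chars.splitOn s [','] = pvSplitComma s)

theorem pvLoopA_eq (tb cs : List Char) : ∀ (k : Nat), ∀ (inicio fin : Nat),
    cs.length + 1 - fin ≤ k → inicio ≤ fin → fin ≤ cs.length →
    pvLoopA tb cs inicio fin
      = decide (tb ∈ pvMapHead ((cs.drop inicio).take (fin - inicio)) (pvSplitComma (cs.drop fin))) := by
  intro k
  induction k with
  | zero => intro inicio fin hk h1 h2; omega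
  | succ n ih =>
    intro inicio fin hk h1 h2
    rw [pvLoopA]
    rw [dif_pos h2]
    rcases Nat.lt_or_ge fin cs.length with hlt | hge
    · -- fin < length
      have hdrop : cs.drop fin = cs[fin] :: cs.drop (fin + 1) := by
        rw [List.drop_eq_getElem_cons hlt]
      by_cases hc : cs[fin] = ','
      · have hcond : fin = cs.length ∨ PySem.List.pyGet? cs (fin : Int) = some ',' := by
          right
          simp [PySem.List.pyGet?_natCast, List.getElem?_eq_getElem hlt, hc]
        rw [if_pos hcond]
        simp only [PySem.List.slice_natCast]
        rw [hdrop, hc]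
        by_cases heq : (cs.drop inicio).take (fin - inicio) = tb
        · simp [pvSplitComma, pvMapHead, heq]
        · rw [if_neg heq]
          rw [ih (fin + 1) (fin + 1) (by omega) le_rfl hlt]
          cases hsc : pvSplitComma (cs.drop (fin + 1)) with
          | nil => exact absurd hsc (pvSplitComma_ne_nil _)
          | cons hh tt =>
            simp [pvSplitComma, pvMapHead, hsc]
            exact fun e => absurd e.symm heq
      · have hcond : ¬ (fin = cs.length ∨ PySem.List.pyGet? cs (fin : Int) = some ',') := by
          push Not
          constructor
          · omega
          · simp [PySem.List.pyGet?_natCast, List.getElem?_eq_getElem hlt, hc]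
        rw [if_neg hcond]
        rw [ih inicio (fin + 1) (by omega) (by omega) hlt]
        congr 1
        rw [hdrop]
        simp only [pvSplitComma, if_neg hc]
        cases hsc : pvSplitComma (cs.drop (fin+1)) with
        | nil => exact absurd hsc (pvSplitComma_ne_nil _)
        | cons hh tt =>
          simp only [pvMapHead]
          have htake : (cs.drop inicio).take (fin + 1 - inicio)
              = (cs.drop inicio).take (fin - inicio) ++ [cs[fin]] := by
            have h3 : fin + 1 - inicio = (fin - inicio) + 1 := by omega
            rw [h3, List.take_add_one]
            congr 1
            have : (cs.drop inicio)[fin - inicio]? = some cs[fin] := by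
              simp only [List.getElem?_drop]
              have e : inicio + (fin - inicio) = fin := by omega
              rw [e, List.getElem?_eq_getElem hlt]
            simp [this]
          rw [htake]
          simp
    · -- fin = length
      have hfin : fin = cs.length := by omega
      rw [if_pos (Or.inl hfin)]
      simp only [PySem.List.slice_natCast]
      have hdrop : cs.drop fin = [] := by simp [hfin]
      rw [hdrop]
      simp only [pvSplitComma, pvMapHead]
      by_cases heq : (cs.drop inicio).take (fin - inicio) = tb
      · simp [heq]
      · rw [if_neg heq]
        rw [pvLoopA]
        rw [dif_neg (by omega)]
        simp
        exact fun e => heq e.symm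

theorem pvContains_map_ofList (tb : String) (L : List (List Char)) :
    (L.map String.ofList).contains tb = decide (tb.toList ∈ L) := by
  rw [Bool.eq_iff_iff]
  simp only [List.contains_iff_mem, List.mem_map, decide_eq_true_eq]
  constructor
  · rintro ⟨a, ha, e⟩
    rw [← e]
    simpa using ha
  · intro h
    exact ⟨tb.toList, h, by simp⟩

theorem buscar_tiempo_en_tiempos_spec : Claim_equal_buscar_tiempo_en_tiempos := by
  intro tb ts _
  unfold Spec_buscar_tiempo_en_tiempos buscar_tiempo_en_tiempos buscar_tiempo_en_tiempos_alt
  rw [pvLoopA_eq tb.toList ts.toList (ts.toList.length + 1) 0 0 (by omega) le_rfl (by omega)]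
  rw [pvContains_map_ofList]
  have hsep : (",".toList : List Char) = [','] := by decide
  rw [hsep, pvSplitOn_eq_splitComma]
  simp only [List.drop_zero, Nat.sub_zero, List.take_zero]
  have hm : pvMapHead [] (pvSplitComma ts.toList) = pvSplitComma ts.toList := by
    cases hsc : pvSplitComma ts.toList with
    | nil => exact absurd hsc (pvSplitComma_ne_nil _)
    | cons hh tt => simp [pvMapHead]
  simp only [hm]
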